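-- pv_equiv track=rewrite | github.com/lukacslacko/csaszar | rotation_search.py | _link_is_one_cycle
-- ===== SOURCE A (Python) =====
-- def _link_is_one_cycle(vertex, faces_containing):
--     if not faces_containing:
--         return False
--     link_edges = []
--     link_verts = set()
--     for face in faces_containing:
--         opp = [x for x in face if x != vertex]
--         link_edges.append(tuple(sorted(opp)))
--         link_verts.update(opp)
--     deg = {v: 0 for v in link_verts}
--     for (a, b) in link_edges:
--         deg[a] += 1; deg[b] += 1
--     if any(d != 2 for d in deg.values()):
--         return False
--     adj = {v: [] for v in link_verts}
--     for (a, b) in link_edges: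
--         adj[a].append(b); adj[b].append(a)
--     start = next(iter(link_verts))
--     seen = {start}
--     stack = [start]
--     while stack:
--         u = stack.pop()
--         for w in adj[u]:
--             if w not in seen:
--                 seen.add(w); stack.append(w)
--     return len(seen) == len(link_verts)
-- ===== SOURCE B (Python) =====
-- def _link_is_one_cycle(vertex, faces_containing):
--     if not faces_containing:
--         return False
--     link_edges = [tuple(sorted(x for x in face if x != vertex))
--                   for face in faces_containing]
--     deg = {}
--     for a, b in link_edges:
--         deg[a] = deg.get(a, 0) + 1
--         deg[b] = deg.get(b, 0) + 1
--     if any(d != 2 for d in deg.values()):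
--         return False
--     # connectivity by edge-list saturation: no adjacency dict, no DFS stack
--     seen = {link_edges[0][0]}
--     changed = True
--     while changed:
--         changed = False
--         for a, b in link_edges:
--             if (a in seen) != (b in seen):
--                 seen.add(a)
--                 seen.add(b)
--                 changed = True
--     return len(seen) == len(deg)
-- ===== Notes on version B (the rewrite author's own statement) =====
-- stated objective: alternative
-- what changed: Connectivity of the link is decided by repeated relaxation over the edge list (grow the seen set until a fixpoint) instead of building an adjacency dict and running a stack-based DFS; degrees are counted directly with dict.get instead of pre-initializing a zero dict over the vertex set.
import Mathlib
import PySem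

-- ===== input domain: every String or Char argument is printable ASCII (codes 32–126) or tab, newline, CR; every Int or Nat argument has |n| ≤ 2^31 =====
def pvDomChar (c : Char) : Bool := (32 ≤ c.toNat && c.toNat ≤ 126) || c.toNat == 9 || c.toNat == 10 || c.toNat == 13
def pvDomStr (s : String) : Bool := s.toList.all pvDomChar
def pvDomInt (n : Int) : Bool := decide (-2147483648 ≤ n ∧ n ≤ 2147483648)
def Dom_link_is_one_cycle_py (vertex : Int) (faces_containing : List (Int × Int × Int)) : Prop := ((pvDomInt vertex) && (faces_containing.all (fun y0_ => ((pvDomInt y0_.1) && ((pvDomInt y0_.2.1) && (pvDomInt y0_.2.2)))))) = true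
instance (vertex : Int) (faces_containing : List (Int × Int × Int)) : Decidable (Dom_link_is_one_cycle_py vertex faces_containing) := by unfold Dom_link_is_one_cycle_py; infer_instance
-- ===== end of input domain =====

-- ===== PORT A =====
-- helpers shared by both ports: opp-list of a face and its sorted 2-tuple
def pvOpp (vertex : Int) (face : Int × Int × Int) : List Int :=
  [face.1, face.2.1, face.2.2].filter (fun x => x != vertex)

def pvEdgeOf (vertex : Int) (face : Int × Int × Int) : Int × Int :=
  match PySem.List.sorted (pvOpp vertex face) (fun x => x) false with
  | [a, b] => (a, b)
  | _ => (0, 0)   -- Python's 2-tuple unpacking raises ValueError here; excluded by Pre_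

lemma pvContains_eq_decide (s : List Int) (x : Int) :
    PySem.Set.contains s x = decide (x ∈ s) := by
  by_cases hm : x ∈ s
  · simp [hm, (PySem.Set.contains_iff s x).mpr hm]
  · simp only [hm, decide_false]
    cases h : PySem.Set.contains s x
    · rfl
    · exact absurd ((PySem.Set.contains_iff s x).mp h) hm

-- termination helpers for pvDfsLoop (cited by its decreasing_by)
def pvAllVals (adj : PySem.Dict Int (List Int)) : List Int := (PySem.Dict.values adj).flatten

def pvUnseenD (adj : PySem.Dict Int (List Int)) (seen : List Int) : Nat :=
  ((PySem.List.dedup (pvAllVals adj)).filter (fun v => !PySem.Set.contains seen v)).length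

lemma pvFilter_le {α : Type} (l : List α) (p q : α → Bool) (h : ∀ x, p x = true → q x = true) :
    (l.filter p).length ≤ (l.filter q).length := by
  induction l with
  | nil => simp
  | cons a t ih =>
    by_cases hp : p a = true
    · simp [List.filter_cons, hp, h a hp]; omega
    · rw [Bool.not_eq_true] at hp
      simp only [List.filter_cons, hp, Bool.false_eq_true, if_false]
      cases hq : q a <;> simp <;> omega

lemma pvFilter_lt {α : Type} (l : List α) (p q : α → Bool) (h : ∀ x, p x = true → q x = true)
    (w : α) (hw : w ∈ l) (hq : q w = true) (hp : p w = false) :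
    (l.filter p).length < (l.filter q).length := by
  induction l with
  | nil => simp at hw
  | cons a t ih =>
    rcases List.mem_cons.mp hw with rfl | hwt
    · have := pvFilter_le t p q h
      simp [List.filter_cons, hp, hq]
      omega
    · have ht := ih hwt
      by_cases hpa : p a = true
      · simp [List.filter_cons, hpa, h a hpa]; omega
      · rw [Bool.not_eq_true] at hpa
        simp only [List.filter_cons, hpa, Bool.false_eq_true, if_false]
        cases hqa : q a <;> simp <;> omega

lemma pvUnseenD_add_lt (adj : PySem.Dict Int (List Int)) (seen : List Int) (w : Int)
    (hw : w ∈ pvAllVals adj) (hns : w ∉ seen) :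
    pvUnseenD adj (PySem.Set.add seen w) < pvUnseenD adj seen := by
  unfold pvUnseenD
  refine pvFilter_lt _ _ _ ?_ w ?_ ?_ ?_
  · intro x hx
    simp only [pvContains_eq_decide, Bool.not_eq_eq_eq_not, Bool.not_true,
      decide_eq_false_iff_not, PySem.Set.mem_add] at hx ⊢
    tauto
  · rw [PySem.List.mem_dedup]; exact hw
  · simp [pvContains_eq_decide, hns]
  · simp [pvContains_eq_decide, PySem.Set.mem_add]

def pvDfsStep (st : PySem.Set Int × List Int) (w : Int) : PySem.Set Int × List Int :=
  if PySem.Set.contains st.1 w then st else (PySem.Set.add st.1 w, w :: st.2)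

lemma pvDfsFold_measure (adj : PySem.Dict Int (List Int)) (ws : List Int)
    (hws : ∀ w ∈ ws, w ∈ pvAllVals adj) :
    ∀ (seen : PySem.Set Int) (rest : List Int),
      2 * pvUnseenD adj (ws.foldl pvDfsStep (seen, rest)).1 + (ws.foldl pvDfsStep (seen, rest)).2.length
        ≤ 2 * pvUnseenD adj seen + rest.length := by
  induction ws with
  | nil => intro seen rest; simp
  | cons w t ih =>
    intro seen rest
    have hws' : ∀ x ∈ t, x ∈ pvAllVals adj := fun x hx => hws x (List.mem_cons_of_mem _ hx)
    simp only [List.foldl_cons]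
    by_cases hm : w ∈ seen
    · have hstep : pvDfsStep (seen, rest) w = (seen, rest) := by
        simp [pvDfsStep, pvContains_eq_decide, hm]
      rw [hstep]
      exact ih hws' seen rest
    · have hstep : pvDfsStep (seen, rest) w = (PySem.Set.add seen w, w :: rest) := by
        simp [pvDfsStep, pvContains_eq_decide, hm]
      rw [hstep]
      have h1 := ih hws' (PySem.Set.add seen w) (w :: rest)
      have h2 := pvUnseenD_add_lt adj seen w (hws w List.mem_cons_self) hm
      simp only [List.length_cons] at h1 ⊢
      omega

lemma pvGetD_subset_allVals (adj : PySem.Dict Int (List Int)) (u : Int) :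
    ∀ w ∈ PySem.Dict.getD adj u [], w ∈ pvAllVals adj := by
  intro w hw
  rw [PySem.Dict.getD_eq_get?_getD] at hw
  cases hg : PySem.Dict.get? adj u with
  | none => rw [hg] at hw; simp at hw
  | some v =>
    rw [hg] at hw
    simp only [Option.getD_some] at hw
    have hitems := PySem.Dict.mem_items_of_get?_eq_some adj hg
    refine List.mem_flatten.mpr ⟨v, ?_, hw⟩
    simp only [PySem.Dict.values]
    exact List.mem_map.mpr ⟨(u, v), hitems, rfl⟩

def pvDfsLoop (adj : PySem.Dict Int (List Int)) (seen : PySem.Set Int) (stack : List Int) :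
    PySem.Set Int :=
  match stack with
  | [] => seen
  | u :: rest =>
    let st := (PySem.Dict.getD adj u []).foldl pvDfsStep (seen, rest)
    pvDfsLoop adj st.1 st.2
termination_by 2 * pvUnseenD adj seen + stack.length
decreasing_by
  have := pvDfsFold_measure adj (PySem.Dict.getD adj u []) (pvGetD_subset_allVals adj u) seen rest
  simp only [List.length_cons]
  omega

def link_is_one_cycle_py (vertex : Int) (faces_containing : List (Int × Int × Int)) : Bool :=
  if faces_containing = [] then false
  else
    let acc := faces_containing.foldl
      (fun (st : List (Int × Int) × PySem.Set Int) face =>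
        (st.1 ++ [pvEdgeOf vertex face], PySem.Set.update st.2 (pvOpp vertex face)))
      ([], PySem.Set.empty)
    let link_edges := acc.1
    let link_verts := acc.2
    let deg0 := link_verts.foldl (fun (d : PySem.Dict Int Int) v => d.insert v 0) PySem.Dict.empty
    let deg := link_edges.foldl
      (fun d (e : Int × Int) => (PySem.Dict.modify d e.1 0 (· + 1)).modify e.2 0 (· + 1)) deg0
    if (PySem.Dict.values deg).any (fun dv => dv != 2) then false
    else
      let adj0 := link_verts.foldl
        (fun (d : PySem.Dict Int (List Int)) v => d.insert v []) PySem.Dict.empty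
      let adj := link_edges.foldl
        (fun d (e : Int × Int) =>
          (PySem.Dict.modify d e.1 [] (· ++ [e.2])).modify e.2 [] (· ++ [e.1])) adj0
      -- next(iter(link_verts)): StopIteration on an empty set is unreachable under Pre_;
      -- the final result does not depend on which element iteration yields first
      let start := link_verts.headD 0
      let seen := pvDfsLoop adj (PySem.Set.ofList [start]) [start]
      decide (PySem.Set.len seen = PySem.Set.len link_verts)

-- ===== PORT B =====
def pvEnds (E : List (Int × Int)) : List Int := E.flatMap (fun e => [e.1, e.2])

def pvUnseenE (E : List (Int × Int)) (seen : List Int) : Nat :=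
  ((PySem.List.dedup (pvEnds E)).filter (fun v => !PySem.Set.contains seen v)).length

def pvRelaxStep (st : PySem.Set Int × Bool) (e : Int × Int) : PySem.Set Int × Bool :=
  if (PySem.Set.contains st.1 e.1) != (PySem.Set.contains st.1 e.2)
  then (PySem.Set.add (PySem.Set.add st.1 e.1) e.2, true)
  else st

lemma pvRelaxStep_eq_of_iff {s : PySem.Set Int} {ch : Bool} {e : Int × Int}
    (h : e.1 ∈ s ↔ e.2 ∈ s) : pvRelaxStep (s, ch) e = (s, ch) := by
  unfold pvRelaxStep
  rw [if_neg]
  simp only [pvContains_eq_decide, bne_iff_ne, ne_eq, not_not]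
  by_cases h1 : e.1 ∈ s
  · simp [h1, h.mp h1]
  · have h2 : e.2 ∉ s := fun hh => h1 (h.mpr hh)
    simp [h1, h2]

lemma pvRelaxStep_eq_of_xor {s : PySem.Set Int} {ch : Bool} {e : Int × Int}
    (h : ¬ (e.1 ∈ s ↔ e.2 ∈ s)) :
    pvRelaxStep (s, ch) e = (PySem.Set.add (PySem.Set.add s e.1) e.2, true) := by
  unfold pvRelaxStep
  rw [if_pos]
  simp only [pvContains_eq_decide, bne_iff_ne, ne_eq]
  intro hd
  apply h
  by_cases h1 : e.1 ∈ s <;> by_cases h2 : e.2 ∈ s <;> simp [h1, h2] at hd ⊢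

lemma pvRelaxFold_mono (E : List (Int × Int)) :
    ∀ (st : PySem.Set Int × Bool) (v : Int), v ∈ st.1 → v ∈ (E.foldl pvRelaxStep st).1 := by
  induction E with
  | nil => intro st v h; simpa using h
  | cons e t ih =>
    intro st v h
    simp only [List.foldl_cons]
    apply ih
    unfold pvRelaxStep
    split
    · simp [PySem.Set.mem_add, h]
    · exact h

lemma pvRelaxFold_flag (E : List (Int × Int)) :
    ∀ (s : PySem.Set Int), (E.foldl pvRelaxStep (s, false)).2 = true →
      ∃ w ∈ pvEnds E, w ∉ s ∧ w ∈ (E.foldl pvRelaxStep (s, false)).1 := by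
  induction E with
  | nil => intro s h; simp at h
  | cons e t ih =>
    intro s h
    simp only [List.foldl_cons] at h ⊢
    by_cases hc : e.1 ∈ s ↔ e.2 ∈ s
    · rw [pvRelaxStep_eq_of_iff hc] at h ⊢
      obtain ⟨w, hw1, hw2, hw3⟩ := ih s h
      refine ⟨w, ?_, hw2, hw3⟩
      simp only [pvEnds, List.flatMap_cons, List.mem_append] at hw1 ⊢
      exact Or.inr hw1
    · rw [pvRelaxStep_eq_of_xor hc] at h ⊢
      by_cases h1 : e.1 ∈ s
      · have h2 : e.2 ∉ s := fun h2 => hc ⟨fun _ => h2, fun _ => h1⟩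
        refine ⟨e.2, ?_, h2, ?_⟩
        · simp [pvEnds]
        · exact pvRelaxFold_mono t _ e.2 (by simp [PySem.Set.mem_add])
      · refine ⟨e.1, ?_, h1, ?_⟩
        · simp [pvEnds]
        · exact pvRelaxFold_mono t _ e.1 (by simp [PySem.Set.mem_add])

lemma pvRelax_measure (E : List (Int × Int)) (s : PySem.Set Int)
    (h : (E.foldl pvRelaxStep (s, false)).2 = true) :
    pvUnseenE E (E.foldl pvRelaxStep (s, false)).1 < pvUnseenE E s := by
  obtain ⟨w, hw1, hw2, hw3⟩ := pvRelaxFold_flag E s h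
  unfold pvUnseenE
  refine pvFilter_lt _ _ _ ?_ w ?_ ?_ ?_
  · intro x hx
    simp only [pvContains_eq_decide, Bool.not_eq_eq_eq_not, Bool.not_true,
      decide_eq_false_iff_not] at hx ⊢
    intro hmem
    exact hx (pvRelaxFold_mono E (s, false) x hmem)
  · rw [PySem.List.mem_dedup]; exact hw1
  · simp [pvContains_eq_decide, hw2]
  · simp [pvContains_eq_decide, hw3]

def pvRelaxLoop (E : List (Int × Int)) (seen : PySem.Set Int) : PySem.Set Int :=
  if h : (E.foldl pvRelaxStep (seen, false)).2 = true
  then pvRelaxLoop E (E.foldl pvRelaxStep (seen, false)).1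
  else (E.foldl pvRelaxStep (seen, false)).1
termination_by pvUnseenE E seen
decreasing_by
  rw [List.foldl_attach]
  exact pvRelax_measure E seen h

def link_is_one_cycle_py_alt (vertex : Int) (faces_containing : List (Int × Int × Int)) : Bool :=
  if faces_containing = [] then false
  else
    let link_edges := faces_containing.map (fun face => pvEdgeOf vertex face)
    let deg := link_edges.foldl
      (fun (d : PySem.Dict Int Int) (e : Int × Int) =>
        let d1 := d.insert e.1 (d.getD e.1 0 + 1)
        d1.insert e.2 (d1.getD e.2 0 + 1))
      PySem.Dict.empty
    if (PySem.Dict.values deg).any (fun dv => dv != 2) then false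
    else
      -- link_edges[0][0]: an IndexError is unreachable, faces_containing ≠ []
      let start := (link_edges.headD (0, 0)).1
      let seen := pvRelaxLoop link_edges (PySem.Set.ofList [start])
      decide (PySem.Set.len seen = (PySem.Dict.size deg : Int))

-- ===== PRECONDITION & SPEC =====
-- Pre_ excludes exactly the inputs on which Python A raises: a face whose opposite list
-- (coordinates different from `vertex`) does not have exactly 2 elements makes the
-- 2-tuple unpacking `for (a, b) in link_edges` raise ValueError.
def Pre_link_is_one_cycle_py (vertex : Int) (faces_containing : List (Int × Int × Int)) : Prop :=
  ∀ face ∈ faces_containing, (pvOpp vertex face).length = 2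

instance (vertex : Int) (faces_containing : List (Int × Int × Int)) :
    Decidable (Pre_link_is_one_cycle_py vertex faces_containing) := by
  unfold Pre_link_is_one_cycle_py; infer_instance

def pvWitness_link_is_one_cycle_py : Int × (List (Int × Int × Int)) :=
  (0, [(0, 1, 2), (0, 2, 3), (0, 3, 1)])

def Spec_link_is_one_cycle_py (vertex : Int) (faces_containing : List (Int × Int × Int))
    (out : Bool) : Prop :=
  out = link_is_one_cycle_py_alt vertex faces_containing

instance (vertex : Int) (faces_containing : List (Int × Int × Int)) (out : Bool) :
    Decidable (Spec_link_is_one_cycle_py vertex faces_containing out) := by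
  unfold Spec_link_is_one_cycle_py; infer_instance

-- ===== CLAIM (what is proved, stated in full; the proofs are below) =====
def Claim_equal_link_is_one_cycle_py : Prop :=
  ∀ (vertex : Int) (faces_containing : List (Int × Int × Int)),
    Dom_link_is_one_cycle_py vertex faces_containing →
    Pre_link_is_one_cycle_py vertex faces_containing →
    Spec_link_is_one_cycle_py vertex faces_containing (link_is_one_cycle_py vertex faces_containing)

-- ===== LEMMAS AND PROOFS =====

-- the symmetric incidence relation of an edge list, and reflexive-transitive reachability
def pvRel (E : List (Int × Int)) (u w : Int) : Prop := (u, w) ∈ E ∨ (w, u) ∈ E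

def pvAdj (adj : PySem.Dict Int (List Int)) (u w : Int) : Prop :=
  w ∈ PySem.Dict.getD adj u []

def pvIsReachSet (R : Int → Int → Prop) (start : Int) (S : List Int) : Prop :=
  start ∈ S ∧ (∀ v ∈ S, Relation.ReflTransGen R start v) ∧
    (∀ u ∈ S, ∀ w, R u w → w ∈ S)

lemma pvReachSet_mem {R : Int → Int → Prop} {start : Int} {S : List Int}
    (h : pvIsReachSet R start S) (v : Int) :
    v ∈ S ↔ Relation.ReflTransGen R start v := by
  constructor
  · exact h.2.1 v
  · intro hr
    induction hr with
    | refl => exact h.1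
    | tail h1 step ih => exact h.2.2 _ ih _ step

lemma pvAcc_eq (vertex : Int) (faces : List (Int × Int × Int)) :
    ∀ (es : List (Int × Int)) (s : PySem.Set Int),
      faces.foldl
        (fun (st : List (Int × Int) × PySem.Set Int) face =>
          (st.1 ++ [pvEdgeOf vertex face], PySem.Set.update st.2 (pvOpp vertex face))) (es, s)
      = (es ++ faces.map (fun face => pvEdgeOf vertex face),
         faces.foldl (fun s f => PySem.Set.update s (pvOpp vertex f)) s) := by
  induction faces with
  | nil => intro es s; simp
  | cons f t ih =>
    intro es s
    simp only [List.foldl_cons, List.map_cons]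
    rw [ih]
    simp

lemma pvMem_vertsFold (vertex : Int) (faces : List (Int × Int × Int)) :
    ∀ (s : PySem.Set Int) (v : Int),
      v ∈ faces.foldl (fun s f => PySem.Set.update s (pvOpp vertex f)) s ↔
        v ∈ s ∨ ∃ f ∈ faces, v ∈ pvOpp vertex f := by
  induction faces with
  | nil => intro s v; simp
  | cons f t ih =>
    intro s v
    simp only [List.foldl_cons]
    rw [ih]
    simp only [PySem.Set.mem_update, List.mem_cons]
    constructor
    · rintro ((h | h) | ⟨g, hg, hm⟩)
      · exact Or.inl h
      · exact Or.inr ⟨f, Or.inl rfl, h⟩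
      · exact Or.inr ⟨g, Or.inr hg, hm⟩
    · rintro (h | ⟨g, (rfl | hg), hm⟩)
      · exact Or.inl (Or.inl h)
      · exact Or.inl (Or.inr hm)
      · exact Or.inr ⟨g, hg, hm⟩

lemma pvNodup_vertsFold (vertex : Int) (faces : List (Int × Int × Int)) :
    ∀ (s : PySem.Set Int), s.Nodup →
      (faces.foldl (fun s f => PySem.Set.update s (pvOpp vertex f)) s).Nodup := by
  induction faces with
  | nil => intro s h; simpa using h
  | cons f t ih => intro s h; exact ih _ (PySem.Set.nodup_update _ _ h)

lemma pvEdgeOf_eq (vertex : Int) (f : Int × Int × Int) (x y : Int)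
    (hl : pvOpp vertex f = [x, y]) :
    pvEdgeOf vertex f = if x ≤ y then (x, y) else (y, x) := by
  unfold pvEdgeOf
  rw [hl]
  by_cases hxy : x ≤ y
  · rw [PySem.List.sorted_id_eq_of_perm_of_pairwise [x, y] [x, y] (List.Perm.refl _) (by simp [hxy])]
    simp [hxy]
  · have hyx : y ≤ x := by omega
    rw [PySem.List.sorted_id_eq_of_perm_of_pairwise [x, y] [y, x] (List.Perm.swap x y []) (by simp [hyx])]
    simp [hxy]

lemma pvMem_opp_iff_edge (vertex : Int) (f : Int × Int × Int)
    (h : (pvOpp vertex f).length = 2) (v : Int) :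
    v ∈ pvOpp vertex f ↔ (v = (pvEdgeOf vertex f).1 ∨ v = (pvEdgeOf vertex f).2) := by
  cases hl : pvOpp vertex f with
  | nil => rw [hl] at h; simp at h
  | cons x l1 =>
    cases l1 with
    | nil => rw [hl] at h; simp at h
    | cons y l2 =>
      cases l2 with
      | cons z t => rw [hl] at h; simp at h
      | nil =>
        rw [pvEdgeOf_eq vertex f x y hl]
        by_cases hxy : x ≤ y <;> simp [hxy] <;> tauto

lemma pvMem_ends_verts (vertex : Int) (faces : List (Int × Int × Int))
    (hpre : ∀ f ∈ faces, (pvOpp vertex f).length = 2) (v : Int) :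
    v ∈ pvEnds (faces.map (fun face => pvEdgeOf vertex face)) ↔
      ∃ f ∈ faces, v ∈ pvOpp vertex f := by
  simp only [pvEnds]
  rw [List.mem_flatMap]
  constructor
  · rintro ⟨e, he, hv⟩
    rw [List.mem_map] at he
    obtain ⟨f, hf, rfl⟩ := he
    refine ⟨f, hf, ?_⟩
    rw [pvMem_opp_iff_edge vertex f (hpre f hf)]
    simpa using hv
  · rintro ⟨f, hf, hv⟩
    refine ⟨pvEdgeOf vertex f, List.mem_map.mpr ⟨f, hf, rfl⟩, ?_⟩
    have := (pvMem_opp_iff_edge vertex f (hpre f hf) v).mp hv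
    simpa using this

lemma pvDegA_fold (E : List (Int × Int)) :
    ∀ (d : PySem.Dict Int Int),
      E.foldl (fun d (e : Int × Int) =>
          (PySem.Dict.modify d e.1 0 (· + 1)).modify e.2 0 (· + 1)) d
      = (pvEnds E).foldl (fun d x => PySem.Dict.modify d x 0 (· + 1)) d := by
  induction E with
  | nil => intro d; simp [pvEnds]
  | cons e t ih =>
    intro d
    have hends : pvEnds (e :: t) = e.1 :: e.2 :: pvEnds t := by simp [pvEnds]
    rw [List.foldl_cons, ih, hends]
    simp [List.foldl_cons]

lemma pvDegB_fold (E : List (Int × Int)) :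
    ∀ (d : PySem.Dict Int Int),
      E.foldl (fun d (e : Int × Int) =>
          let d1 := d.insert e.1 (d.getD e.1 0 + 1)
          d1.insert e.2 (d1.getD e.2 0 + 1)) d
      = (pvEnds E).foldl (fun d x => d.insert x (d.getD x 0 + 1)) d := by
  induction E with
  | nil => intro d; simp [pvEnds]
  | cons e t ih =>
    intro d
    have hends : pvEnds (e :: t) = e.1 :: e.2 :: pvEnds t := by simp [pvEnds]
    rw [List.foldl_cons, ih, hends]
    simp [List.foldl_cons]

lemma pvGetD_const_insert {ν : Type} (xs : List Int) (c : ν) :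
    ∀ (d : PySem.Dict Int ν), (∀ u, PySem.Dict.getD d u c = c) →
      ∀ u, (xs.foldl (fun d v => PySem.Dict.insert d v c) d).getD u c = c := by
  induction xs with
  | nil => intro d h u; simpa using h u
  | cons x t ih =>
    intro d h u
    simp only [List.foldl_cons]
    refine ih _ ?_ u
    intro u2
    rw [PySem.Dict.getD_insert]
    split
    · rfl
    · exact h u2

lemma pvAdjStep_mem (d : PySem.Dict Int (List Int)) (a b u w : Int) :
    w ∈ PySem.Dict.getD ((PySem.Dict.modify d a [] (· ++ [b])).modify b [] (· ++ [a])) u []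
      ↔ w ∈ PySem.Dict.getD d u [] ∨ (u = a ∧ w = b) ∨ (u = b ∧ w = a) := by
  rw [PySem.Dict.getD_modify]
  by_cases hub : u = b
  · rw [if_pos hub, PySem.Dict.getD_modify]
    by_cases hba : b = a
    · rw [if_pos hba]
      subst hub; subst hba
      simp only [List.mem_append, List.mem_singleton]
      tauto
    · rw [if_neg hba]
      subst hub
      simp only [List.mem_append, List.mem_singleton, hba]
      tauto
  · rw [if_neg hub, PySem.Dict.getD_modify]
    by_cases hua : u = a
    · rw [if_pos hua]
      subst hua
      simp only [List.mem_append, List.mem_singleton, hub]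
      tauto
    · rw [if_neg hua]
      simp [hua, hub]

lemma pvMem_adjFold (E : List (Int × Int)) :
    ∀ (d : PySem.Dict Int (List Int)) (u w : Int),
      w ∈ PySem.Dict.getD
          (E.foldl (fun d (e : Int × Int) =>
            (PySem.Dict.modify d e.1 [] (· ++ [e.2])).modify e.2 [] (· ++ [e.1])) d) u []
        ↔ w ∈ PySem.Dict.getD d u [] ∨ (u, w) ∈ E ∨ (w, u) ∈ E := by
  induction E with
  | nil => intro d u w; simp
  | cons e t ih =>
    intro d u w
    rw [List.foldl_cons, ih, pvAdjStep_mem]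
    rcases e with ⟨a, b⟩
    simp only [List.mem_cons, Prod.mk.injEq]
    tauto

lemma pvDfsFold_spec (ws : List Int) :
    ∀ (seen : PySem.Set Int) (rest : List Int),
      (∀ v ∈ seen, v ∈ (ws.foldl pvDfsStep (seen, rest)).1) ∧
      (∀ v ∈ (ws.foldl pvDfsStep (seen, rest)).1, v ∈ seen ∨ v ∈ ws) ∧
      (∀ w ∈ ws, w ∈ (ws.foldl pvDfsStep (seen, rest)).1) ∧
      (∀ v ∈ (ws.foldl pvDfsStep (seen, rest)).2, v ∈ rest ∨ v ∈ ws) ∧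
      (∀ v ∈ rest, v ∈ (ws.foldl pvDfsStep (seen, rest)).2) ∧
      (∀ v ∈ (ws.foldl pvDfsStep (seen, rest)).1,
          v ∈ seen ∨ v ∈ (ws.foldl pvDfsStep (seen, rest)).2) ∧
      (seen.Nodup → (ws.foldl pvDfsStep (seen, rest)).1.Nodup) := by
  induction ws with
  | nil =>
    intro seen rest
    simp only [List.foldl_nil]
    exact ⟨fun v h => h, fun v h => Or.inl h, by simp, fun v h => Or.inl h,
      fun v h => h, fun v h => Or.inl h, fun h => h⟩
  | cons w t ih =>
    intro seen rest
    simp only [List.foldl_cons]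
    by_cases hm : w ∈ seen
    · have hstep : pvDfsStep (seen, rest) w = (seen, rest) := by
        simp [pvDfsStep, pvContains_eq_decide, hm]
      rw [hstep]
      obtain ⟨c1, c2, c3, c4, c5, c6, c7⟩ := ih seen rest
      refine ⟨c1, ?_, ?_, ?_, c5, c6, c7⟩
      · intro v hv
        rcases c2 v hv with h | h
        · exact Or.inl h
        · exact Or.inr (List.mem_cons_of_mem _ h)
      · intro x hx
        rcases List.mem_cons.mp hx with rfl | hx
        · exact c1 x hm
        · exact c3 x hx
      · intro v hv
        rcases c4 v hv with h | h
        · exact Or.inl h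
        · exact Or.inr (List.mem_cons_of_mem _ h)
    · have hstep : pvDfsStep (seen, rest) w = (PySem.Set.add seen w, w :: rest) := by
        simp [pvDfsStep, pvContains_eq_decide, hm]
      rw [hstep]
      obtain ⟨c1, c2, c3, c4, c5, c6, c7⟩ := ih (PySem.Set.add seen w) (w :: rest)
      refine ⟨?_, ?_, ?_, ?_, ?_, ?_, ?_⟩
      · intro v hv
        exact c1 v ((PySem.Set.mem_add seen w v).mpr (Or.inl hv))
      · intro v hv
        rcases c2 v hv with h | h
        · rcases (PySem.Set.mem_add seen w v).mp h with h2 | h2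
          · exact Or.inl h2
          · exact Or.inr (by simp [h2])
        · exact Or.inr (List.mem_cons_of_mem _ h)
      · intro x hx
        rcases List.mem_cons.mp hx with rfl | hx
        · exact c1 x ((PySem.Set.mem_add seen x x).mpr (Or.inr rfl))
        · exact c3 x hx
      · intro v hv
        rcases c4 v hv with h | h
        · rcases List.mem_cons.mp h with rfl | h2
          · exact Or.inr (by simp)
          · exact Or.inl h2
        · exact Or.inr (List.mem_cons_of_mem _ h)
      · intro v hv
        exact c5 v (List.mem_cons_of_mem _ hv)
      · intro v hv
        rcases c6 v hv with h | h
        · rcases (PySem.Set.mem_add seen w v).mp h with h2 | h2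
          · exact Or.inl h2
          · subst h2
            exact Or.inr (c5 v List.mem_cons_self)
        · exact Or.inr h
      · intro hn
        exact c7 (PySem.Set.nodup_add seen w hn)

lemma pvDfsLoop_spec (start : Int) (adj : PySem.Dict Int (List Int))
    (seen : PySem.Set Int) (stack : List Int) :
    (∀ v ∈ stack, v ∈ seen) →
    (∀ v ∈ seen, Relation.ReflTransGen (pvAdj adj) start v) →
    (∀ u ∈ seen, u ∉ stack → ∀ w, pvAdj adj u w → w ∈ seen) →
    seen.Nodup →
    (∀ v ∈ seen, v ∈ pvDfsLoop adj seen stack) ∧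
    (∀ v ∈ pvDfsLoop adj seen stack, Relation.ReflTransGen (pvAdj adj) start v) ∧
    (∀ u ∈ pvDfsLoop adj seen stack, ∀ w, pvAdj adj u w → w ∈ pvDfsLoop adj seen stack) ∧
    (pvDfsLoop adj seen stack).Nodup := by
  have H : ∀ (n : Nat) (seen : PySem.Set Int) (stack : List Int),
      2 * pvUnseenD adj seen + stack.length ≤ n →
      (∀ v ∈ stack, v ∈ seen) →
      (∀ v ∈ seen, Relation.ReflTransGen (pvAdj adj) start v) →
      (∀ u ∈ seen, u ∉ stack → ∀ w, pvAdj adj u w → w ∈ seen) →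
      seen.Nodup →
      (∀ v ∈ seen, v ∈ pvDfsLoop adj seen stack) ∧
      (∀ v ∈ pvDfsLoop adj seen stack, Relation.ReflTransGen (pvAdj adj) start v) ∧
      (∀ u ∈ pvDfsLoop adj seen stack, ∀ w, pvAdj adj u w → w ∈ pvDfsLoop adj seen stack) ∧
      (pvDfsLoop adj seen stack).Nodup := by
    intro n
    induction n with
    | zero =>
      intro seen stack hle h1 h2 h3 h4
      cases stack with
      | nil =>
        simp only [pvDfsLoop]
        exact ⟨fun v hv => hv, h2, fun u hu w hw => h3 u hu (by simp) w hw, h4⟩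
      | cons u rest => simp at hle
    | succ n ihn =>
      intro seen stack hle h1 h2 h3 h4
      cases stack with
      | nil =>
        simp only [pvDfsLoop]
        exact ⟨fun v hv => hv, h2, fun u hu w hw => h3 u hu (by simp) w hw, h4⟩
      | cons u rest =>
        obtain ⟨c1, c2, c3, c4, c5, c6, c7⟩ := pvDfsFold_spec (PySem.Dict.getD adj u []) seen rest
        set st := (PySem.Dict.getD adj u []).foldl pvDfsStep (seen, rest) with hstdef
        have hu_seen : u ∈ seen := h1 u List.mem_cons_self
        have hrest : ∀ v ∈ rest, v ∈ seen := fun v hv => h1 v (List.mem_cons_of_mem _ hv)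
        have H1 : ∀ v ∈ st.2, v ∈ st.1 := by
          intro v hv
          rcases c4 v hv with h | h
          · exact c1 v (hrest v h)
          · exact c3 v h
        have H2 : ∀ v ∈ st.1, Relation.ReflTransGen (pvAdj adj) start v := by
          intro v hv
          rcases c2 v hv with h | h
          · exact h2 v h
          · exact Relation.ReflTransGen.tail (h2 u hu_seen) h
        have H3 : ∀ x ∈ st.1, x ∉ st.2 → ∀ w, pvAdj adj x w → w ∈ st.1 := by
          intro x hx hnot w hw
          have hxseen : x ∈ seen := by
            rcases c2 x hx with h | h
            · exact h
            · rcases c6 x hx with h2' | h2'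
              · exact h2'
              · exact absurd h2' hnot
          by_cases hxu : x = u
          · subst hxu
            exact c3 w hw
          · have hxrest : x ∉ rest := fun hr => hnot (c5 x hr)
            have hxstack : x ∉ u :: rest := by simp [hxu, hxrest]
            exact c1 w (h3 x hxseen hxstack w hw)
        have H4 : st.1.Nodup := c7 h4
        have hmeas := pvDfsFold_measure adj (PySem.Dict.getD adj u [])
          (pvGetD_subset_allVals adj u) seen rest
        rw [← hstdef] at hmeas
        have hle' : 2 * pvUnseenD adj st.1 + st.2.length ≤ n := by
          simp only [List.length_cons] at hle
          omega
        have heq : pvDfsLoop adj seen (u :: rest) = pvDfsLoop adj st.1 st.2 := by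
          rw [pvDfsLoop]
        obtain ⟨g1, g2, g3, g4⟩ := ihn st.1 st.2 hle' H1 H2 H3 H4
        rw [heq]
        exact ⟨fun v hv => g1 v (c1 v hv), g2, g3, g4⟩
  intro h1 h2 h3 h4
  exact H (2 * pvUnseenD adj seen + stack.length) seen stack le_rfl h1 h2 h3 h4

lemma pvRelaxFold_spec (E0 : List (Int × Int)) (start : Int) :
    ∀ (E : List (Int × Int)), (∀ e ∈ E, e ∈ E0) → ∀ (s : PySem.Set Int) (ch : Bool),
      ((∀ v ∈ s, Relation.ReflTransGen (pvRel E0) start v) →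
          ∀ v ∈ (E.foldl pvRelaxStep (s, ch)).1, Relation.ReflTransGen (pvRel E0) start v) ∧
      (s.Nodup → (E.foldl pvRelaxStep (s, ch)).1.Nodup) ∧
      (ch = true → (E.foldl pvRelaxStep (s, ch)).2 = true) ∧
      (ch = false → (E.foldl pvRelaxStep (s, ch)).2 = false →
          (E.foldl pvRelaxStep (s, ch)).1 = s ∧ ∀ e ∈ E, (e.1 ∈ s ↔ e.2 ∈ s)) := by
  intro E
  induction E with
  | nil =>
    intro hE s ch
    refine ⟨fun h v hv => h v hv, fun h => h, fun h => h, fun _ _ => ⟨rfl, ?_⟩⟩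
    intro e he
    simp at he
  | cons e t ih =>
    intro hE s ch
    have hE' : ∀ x ∈ t, x ∈ E0 := fun x hx => hE x (List.mem_cons_of_mem _ hx)
    have he0 : e ∈ E0 := hE e List.mem_cons_self
    simp only [List.foldl_cons]
    by_cases hc : e.1 ∈ s ↔ e.2 ∈ s
    · rw [pvRelaxStep_eq_of_iff hc]
      obtain ⟨d1, d2, d3, d4⟩ := ih hE' s ch
      refine ⟨d1, d2, d3, ?_⟩
      intro hch hr2
      obtain ⟨hs, hall⟩ := d4 hch hr2
      refine ⟨hs, ?_⟩
      intro x hx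
      rcases List.mem_cons.mp hx with rfl | hx
      · exact hc
      · exact hall x hx
    · rw [pvRelaxStep_eq_of_xor hc]
      obtain ⟨d1, d2, d3, d4⟩ := ih hE' (PySem.Set.add (PySem.Set.add s e.1) e.2) true
      have hbase : (∀ v ∈ s, Relation.ReflTransGen (pvRel E0) start v) →
          ∀ v ∈ PySem.Set.add (PySem.Set.add s e.1) e.2,
            Relation.ReflTransGen (pvRel E0) start v := by
        intro hr v hv
        rcases (PySem.Set.mem_add _ e.2 v).mp hv with hv2 | hv2
        · rcases (PySem.Set.mem_add s e.1 v).mp hv2 with hv3 | hv3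
          · exact hr v hv3
          · rw [hv3]
            by_cases h1 : e.1 ∈ s
            · exact hr e.1 h1
            · have h2 : e.2 ∈ s := by
                by_contra h2
                exact hc ⟨fun hh => absurd hh h1, fun hh => absurd hh h2⟩
              exact Relation.ReflTransGen.tail (hr e.2 h2) (Or.inr he0)
        · rw [hv2]
          by_cases h2 : e.2 ∈ s
          · exact hr e.2 h2
          · have h1 : e.1 ∈ s := by
              by_contra h1
              exact hc ⟨fun hh => absurd hh h1, fun hh => absurd hh h2⟩
            exact Relation.ReflTransGen.tail (hr e.1 h1) (Or.inl he0)
      refine ⟨?_, ?_, fun _ => d3 rfl, ?_⟩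
      · intro hr v hv
        exact d1 (hbase hr) v hv
      · intro hn
        exact d2 (PySem.Set.nodup_add _ e.2 (PySem.Set.nodup_add s e.1 hn))
      · intro hch hr2
        exact absurd (d3 rfl) (by simp [hr2])

lemma pvRelaxLoop_spec (start : Int) (E : List (Int × Int)) (s : PySem.Set Int) :
    (∀ v ∈ s, v ∈ pvRelaxLoop E s) ∧
    ((∀ v ∈ s, Relation.ReflTransGen (pvRel E) start v) →
        ∀ v ∈ pvRelaxLoop E s, Relation.ReflTransGen (pvRel E) start v) ∧
    (s.Nodup → (pvRelaxLoop E s).Nodup) ∧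
    (∀ e ∈ E, (e.1 ∈ pvRelaxLoop E s ↔ e.2 ∈ pvRelaxLoop E s)) := by
  have H : ∀ (n : Nat) (s : PySem.Set Int), pvUnseenE E s ≤ n →
      (∀ v ∈ s, v ∈ pvRelaxLoop E s) ∧
      ((∀ v ∈ s, Relation.ReflTransGen (pvRel E) start v) →
          ∀ v ∈ pvRelaxLoop E s, Relation.ReflTransGen (pvRel E) start v) ∧
      (s.Nodup → (pvRelaxLoop E s).Nodup) ∧
      (∀ e ∈ E, (e.1 ∈ pvRelaxLoop E s ↔ e.2 ∈ pvRelaxLoop E s)) := by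
    intro n
    induction n with
    | zero =>
      intro s hle
      obtain ⟨f1, f2, f3, f4⟩ := pvRelaxFold_spec E start E (fun e he => he) s false
      by_cases hflag : (E.foldl pvRelaxStep (s, false)).2 = true
      · exact absurd (pvRelax_measure E s hflag) (by omega)
      · have heq : pvRelaxLoop E s = (E.foldl pvRelaxStep (s, false)).1 := by
          rw [pvRelaxLoop]
          simp [hflag]
        have hfix := f4 rfl (by simpa using hflag)
        rw [heq, hfix.1]
        exact ⟨fun v hv => hv, fun hr v hv => hr v hv, fun hn => hn, hfix.2⟩
    | succ n ihn =>
      intro s hle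
      obtain ⟨f1, f2, f3, f4⟩ := pvRelaxFold_spec E start E (fun e he => he) s false
      by_cases hflag : (E.foldl pvRelaxStep (s, false)).2 = true
      · have hlt := pvRelax_measure E s hflag
        have heq : pvRelaxLoop E s = pvRelaxLoop E (E.foldl pvRelaxStep (s, false)).1 := by
          rw [pvRelaxLoop]
          simp [hflag]
        obtain ⟨g1, g2, g3, g4⟩ := ihn (E.foldl pvRelaxStep (s, false)).1 (by omega)
        rw [heq]
        exact ⟨fun v hv => g1 v (pvRelaxFold_mono E (s, false) v hv),
          fun hr => g2 (f1 hr), fun hn => g3 (f2 hn), g4⟩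
      · have heq : pvRelaxLoop E s = (E.foldl pvRelaxStep (s, false)).1 := by
          rw [pvRelaxLoop]
          simp [hflag]
        have hfix := f4 rfl (by simpa using hflag)
        rw [heq, hfix.1]
        exact ⟨fun v hv => hv, fun hr v hv => hr v hv, fun hn => hn, hfix.2⟩
  exact H (pvUnseenE E s) s le_rfl

lemma pvReach_mem_ends (E : List (Int × Int)) (start v : Int)
    (h : Relation.ReflTransGen (pvRel E) start v) : v = start ∨ v ∈ pvEnds E := by
  induction h with
  | refl => exact Or.inl rfl
  | tail h1 step ih =>
    right
    simp only [pvEnds]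
    rcases step with hs | hs
    · exact List.mem_flatMap.mpr ⟨_, hs, by simp⟩
    · exact List.mem_flatMap.mpr ⟨_, hs, by simp⟩

lemma pvLen_eq_iff (V S : List Int) (hnV : V.Nodup) (hnS : S.Nodup)
    (hsub : ∀ v ∈ S, v ∈ V) :
    S.length = V.length ↔ ∀ v ∈ V, v ∈ S := by
  constructor
  · intro hlen v hv
    have hsp := List.subperm_of_subset hnS (fun x hx => hsub x hx)
    have hperm := hsp.perm_of_length_le (by omega)
    exact hperm.mem_iff.mpr hv
  · intro hall
    have hp : S.Perm V :=
      (List.perm_ext_iff_of_nodup hnS hnV).mpr (fun a => ⟨fun h => hsub a h, fun h => hall a h⟩)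
    exact hp.length_eq

lemma pvAllReach_iff (E : List (Int × Int)) (V : List Int) (s1 s2 : Int)
    (hs1 : s1 ∈ V) (hs2 : s2 ∈ V) :
    (∀ v ∈ V, Relation.ReflTransGen (pvRel E) s1 v) ↔
      (∀ v ∈ V, Relation.ReflTransGen (pvRel E) s2 v) := by
  have hsym : Symmetric (Relation.ReflTransGen (pvRel E)) :=
    Relation.ReflTransGen.symmetric (fun a b hab => Or.symm hab)
  constructor
  · intro h v hv
    exact (hsym (h s2 hs2)).trans (h v hv)
  · intro h v hv
    exact (hsym (h s1 hs1)).trans (h v hv)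

lemma pvSize_eq_keys_length {κ ν : Type} (d : PySem.Dict κ ν) :
    PySem.Dict.size d = d.keys.length := by
  simp [PySem.Dict.size, PySem.Dict.keys]

theorem pvMain (vertex : Int) (faces : List (Int × Int × Int))
    (hpre : ∀ f ∈ faces, (pvOpp vertex f).length = 2) :
    link_is_one_cycle_py vertex faces = link_is_one_cycle_py_alt vertex faces := by
  cases faces with
  | nil => rfl
  | cons f0 fs =>
    have hne : (f0 :: fs : List (Int × Int × Int)) ≠ [] := by simp
    unfold link_is_one_cycle_py link_is_one_cycle_py_alt
    rw [if_neg hne, if_neg hne, pvAcc_eq]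
    simp only [List.nil_append, List.map_cons]
    set E := pvEdgeOf vertex f0 :: fs.map (fun face => pvEdgeOf vertex face) with hEdef
    set verts := (f0 :: fs).foldl (fun s f => PySem.Set.update s (pvOpp vertex f))
      (PySem.Set.empty : PySem.Set Int) with hvertsdef
    have hEmap : E = (f0 :: fs).map (fun face => pvEdgeOf vertex face) := by
      simp [hEdef]
    -- membership bridges
    have hMemV : ∀ v, v ∈ verts ↔ ∃ f ∈ f0 :: fs, v ∈ pvOpp vertex f := by
      intro v
      rw [hvertsdef]
      have := pvMem_vertsFold vertex (f0 :: fs) PySem.Set.empty v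
      simpa [PySem.Set.empty] using this
    have hMemE : ∀ v, v ∈ pvEnds E ↔ ∃ f ∈ f0 :: fs, v ∈ pvOpp vertex f := by
      intro v
      rw [hEmap]
      exact pvMem_ends_verts vertex (f0 :: fs) hpre v
    have hVE : ∀ v, v ∈ verts ↔ v ∈ pvEnds E := fun v => (hMemV v).trans (hMemE v).symm
    have hNodupV : verts.Nodup := by
      rw [hvertsdef]
      exact pvNodup_vertsFold vertex (f0 :: fs) PySem.Set.empty (by simp [PySem.Set.empty])
    -- degree dictionaries
    set deg0 := verts.foldl (fun (d : PySem.Dict Int Int) v => d.insert v 0) PySem.Dict.empty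
      with hdeg0def
    set degA := E.foldl
      (fun d (e : Int × Int) => (PySem.Dict.modify d e.1 0 (· + 1)).modify e.2 0 (· + 1)) deg0
      with hdegAdef
    set degB := E.foldl
      (fun (d : PySem.Dict Int Int) (e : Int × Int) =>
        let d1 := d.insert e.1 (d.getD e.1 0 + 1)
        d1.insert e.2 (d1.getD e.2 0 + 1)) PySem.Dict.empty with hdegBdef
    have hdeg0getD : ∀ u, PySem.Dict.getD deg0 u 0 = 0 := by
      rw [hdeg0def]
      exact pvGetD_const_insert verts 0 PySem.Dict.empty
        (fun u => PySem.Dict.getD_empty u 0)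
    have hdeg0keys : deg0.keys = verts := by
      rw [hdeg0def, PySem.Dict.keys_foldl_insert, PySem.Dict.keys_empty,
        PySem.Set.update_nil_left]
      exact PySem.Set.ofList_eq_self_of_nodup verts hNodupV
    have hdegAgetD : ∀ v, PySem.Dict.getD degA v 0 = ((pvEnds E).count v : Int) := by
      intro v
      rw [hdegAdef, pvDegA_fold, PySem.Dict.getD_foldl_modify_add_one, hdeg0getD]
      ring
    have hdegAkeys : degA.keys = PySem.Set.update verts (pvEnds E) := by
      rw [hdegAdef, pvDegA_fold, PySem.Dict.keys_foldl_modify, hdeg0keys]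
    have hNodupKA : degA.keys.Nodup := by
      rw [hdegAkeys]
      exact PySem.Set.nodup_update verts (pvEnds E) hNodupV
    have hMemKA : ∀ v, v ∈ degA.keys ↔ v ∈ pvEnds E := by
      intro v
      rw [hdegAkeys, PySem.Set.mem_update]
      constructor
      · rintro (h | h)
        · exact (hVE v).mp h
        · exact h
      · exact Or.inr
    have hdegBgetD : ∀ v, PySem.Dict.getD degB v 0 = ((pvEnds E).count v : Int) := by
      intro v
      rw [hdegBdef, pvDegB_fold, PySem.Dict.getD_foldl_insert_add_one]
      rw [PySem.Dict.getD_empty]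
      ring
    have hdegBkeys : degB.keys = PySem.Set.ofList (pvEnds E) := by
      rw [hdegBdef, pvDegB_fold, PySem.Dict.keys_foldl_insert, PySem.Dict.keys_empty,
        PySem.Set.update_nil_left]
    have hNodupKB : degB.keys.Nodup := by
      rw [hdegBkeys]
      exact PySem.Set.nodup_ofList (pvEnds E)
    have hMemKB : ∀ v, v ∈ degB.keys ↔ v ∈ pvEnds E := by
      intro v
      rw [hdegBkeys]
      exact PySem.Set.mem_ofList (pvEnds E) v
    -- the two degree guards agree
    have hany : (PySem.Dict.values degA).any (fun dv => dv != 2)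
        = (PySem.Dict.values degB).any (fun dv => dv != 2) := by
      rw [PySem.Dict.values_eq_map_keys degA hNodupKA 0,
        PySem.Dict.values_eq_map_keys degB hNodupKB 0, List.any_map, List.any_map]
      rw [Bool.eq_iff_iff, List.any_eq_true, List.any_eq_true]
      constructor
      · rintro ⟨k, hk, hp⟩
        refine ⟨k, (hMemKB k).mpr ((hMemKA k).mp hk), ?_⟩
        simp only [Function.comp_apply] at hp ⊢
        rw [hdegBgetD k]
        rw [hdegAgetD k] at hp
        exact hp
      · rintro ⟨k, hk, hp⟩
        refine ⟨k, (hMemKA k).mpr ((hMemKB k).mp hk), ?_⟩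
        simp only [Function.comp_apply] at hp ⊢
        rw [hdegAgetD k]
        rw [hdegBgetD k] at hp
        exact hp
    rw [hany]
    by_cases hA : (PySem.Dict.values degB).any (fun dv => dv != 2) = true
    · rw [if_pos hA, if_pos hA]
    · rw [if_neg hA, if_neg hA, decide_eq_decide]
      -- verts is nonempty
      obtain ⟨start, vs, hvshape⟩ : ∃ a l, verts = a :: l := by
        have hx : ∃ x, x ∈ verts := by
          have h2 := hpre f0 List.mem_cons_self
          cases hl : pvOpp vertex f0 with
          | nil => rw [hl] at h2; simp at h2
          | cons x l1 =>
            exact ⟨x, (hMemV x).mpr ⟨f0, List.mem_cons_self, by rw [hl]; simp⟩⟩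
        obtain ⟨x, hx⟩ := hx
        cases hverts2 : verts with
        | nil => rw [hverts2] at hx; simp at hx
        | cons a l => exact ⟨a, l, rfl⟩
      have hheadV : verts.headD 0 = start := by rw [hvshape]; rfl
      rw [hheadV]
      -- adjacency bridge
      set adj0 := verts.foldl (fun (d : PySem.Dict Int (List Int)) v => d.insert v [])
        PySem.Dict.empty with hadj0def
      set adj := E.foldl
        (fun d (e : Int × Int) =>
          (PySem.Dict.modify d e.1 [] (· ++ [e.2])).modify e.2 [] (· ++ [e.1])) adj0
        with hadjdef
      have hAdj0 : ∀ u, PySem.Dict.getD adj0 u [] = [] := by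
        rw [hadj0def]
        exact pvGetD_const_insert verts [] PySem.Dict.empty
          (fun u => PySem.Dict.getD_empty u [])
      have hAdjIff : ∀ u w, pvAdj adj u w ↔ pvRel E u w := by
        intro u w
        unfold pvAdj pvRel
        rw [hadjdef, pvMem_adjFold, hAdj0]
        simp
      -- the DFS seen-set is the reachable set from start
      have hofl : PySem.Set.ofList [start] = [start] :=
        PySem.Set.ofList_eq_self_of_nodup [start] (by simp)
      rw [hofl]
      obtain ⟨a1, a2, a3, a4⟩ := pvDfsLoop_spec start adj [start] [start]
        (fun v hv => hv)
        (by
          intro v hv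
          rcases List.mem_cons.mp hv with rfl | hv
          · exact Relation.ReflTransGen.refl
          · simp at hv)
        (by
          intro x hx hnot w hw
          exact absurd hx hnot)
        (by simp)
      set SA := pvDfsLoop adj [start] [start] with hSAdef
      have hIsA : pvIsReachSet (pvRel E) start SA := by
        refine ⟨a1 start List.mem_cons_self, ?_, ?_⟩
        · intro v hv
          exact (a2 v hv).mono (fun x y hxy => (hAdjIff x y).mp hxy)
        · intro x hx w hw
          exact a3 x hx w ((hAdjIff x w).mpr hw)
      have hSA : ∀ v, v ∈ SA ↔ Relation.ReflTransGen (pvRel E) start v :=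
        pvReachSet_mem hIsA
      -- the relaxation seen-set is the reachable set from e01
      set e01 := (pvEdgeOf vertex f0).1 with he01def
      have hheadE : ((E.headD ((0 : Int), (0 : Int))).1) = e01 := by
        rw [hEdef]
        rfl
      rw [hheadE]
      have hofl2 : PySem.Set.ofList [e01] = [e01] :=
        PySem.Set.ofList_eq_self_of_nodup [e01] (by simp)
      rw [hofl2]
      obtain ⟨b1, b2, b3, b4⟩ := pvRelaxLoop_spec e01 E [e01]
      set SB := pvRelaxLoop E [e01] with hSBdef
      have hIsB : pvIsReachSet (pvRel E) e01 SB := by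
        refine ⟨b1 e01 List.mem_cons_self, ?_, ?_⟩
        · apply b2
          intro v hv
          rcases List.mem_cons.mp hv with rfl | hv
          · exact Relation.ReflTransGen.refl
          · simp at hv
        · intro x hx w hw
          rcases hw with hw | hw
          · exact (b4 (x, w) hw).mp hx
          · exact (b4 (w, x) hw).mpr hx
      have hSB : ∀ v, v ∈ SB ↔ Relation.ReflTransGen (pvRel E) e01 v :=
        pvReachSet_mem hIsB
      have hNodupA : SA.Nodup := a4
      have hNodupB : SB.Nodup := b3 (by simp)
      -- subset facts
      have hstartV : start ∈ verts := by rw [hvshape]; exact List.mem_cons_self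
      have he01E : e01 ∈ pvEnds E := by
        rw [hEdef]
        simp [pvEnds, he01def]
      have he01V : e01 ∈ verts := (hVE e01).mpr he01E
      have hsubA : ∀ v ∈ SA, v ∈ verts := by
        intro v hv
        rcases pvReach_mem_ends E start v ((hSA v).mp hv) with rfl | h
        · exact hstartV
        · exact (hVE v).mpr h
      have hsubB : ∀ v ∈ SB, v ∈ degB.keys := by
        intro v hv
        rcases pvReach_mem_ends E e01 v ((hSB v).mp hv) with rfl | h
        · exact (hMemKB e01).mpr he01E
        · exact (hMemKB v).mpr h
      -- finish: both sides decide the same connectivity statement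
      have hlen1 : (PySem.Set.len SA = PySem.Set.len verts) ↔ (SA.length = verts.length) :=
        Int.natCast_inj
      have hlen2 : (PySem.Set.len SB = (PySem.Dict.size degB : Int)) ↔
          (SB.length = degB.keys.length) := by
        rw [pvSize_eq_keys_length]
        exact Int.natCast_inj
      rw [hlen1, hlen2]
      rw [pvLen_eq_iff verts SA hNodupV hNodupA hsubA,
        pvLen_eq_iff degB.keys SB hNodupKB hNodupB hsubB]
      have hbridge := pvAllReach_iff E verts start e01 hstartV he01V
      constructor
      · intro h v hv
        have hreach : ∀ x ∈ verts, Relation.ReflTransGen (pvRel E) start x :=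
          fun x hx => (hSA x).mp (h x hx)
        exact (hSB v).mpr (hbridge.mp hreach v ((hVE v).mpr ((hMemKB v).mp hv)))
      · intro h v hv
        have hreach : ∀ x ∈ verts, Relation.ReflTransGen (pvRel E) e01 x :=
          fun x hx => (hSB x).mp (h x ((hMemKB x).mpr ((hVE x).mp hx)))
        exact (hSA v).mpr (hbridge.mpr hreach v hv)

-- ===== VERDICT (by name: the statement is the Claim_ definition above) =====
theorem link_is_one_cycle_py_spec : Claim_equal_link_is_one_cycle_py := by
  intro vertex faces hdom hpre
  unfold Spec_link_is_one_cycle_py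
  exact pvMain vertex faces hpre
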